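-- pv_equiv track=rewrite | github.com/erogue2709/LeetProblems | 37. Sudoku Solver/older/utils.py | convertir_chaine_grille
-- ===== SOURCE A (Python) =====
-- def convertir_chaine_grille(chaine_sodoku) :
--     """
--     La fonction converti une chaine 81 element en une liste de liste ou grille
--     :param chaine:
--     :return:
--      -un boolean
--      -Une grille
--     """
--     if len(chaine_sodoku) !=81 :
--         return False, None
--
--     grille_sodoku = []
--     ligne = []
--
--     for indice, element in enumerate(chaine_sodoku) :
--         ligne.append(int(element))
--
--         if (indice + 1) % 9 ==0 :
--             grille_sodoku.append(ligne)
--             ligne = []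
--     return True, grille_sodoku
-- ===== SOURCE B (Python) =====
-- def convertir_chaine_grille(chaine_sodoku):
--     if len(chaine_sodoku) != 81:
--         return False, None
--     grille = [[int(c) for c in chaine_sodoku[i:i+9]] for i in range(0, 81, 9)]
--     return True, grille
-- ===== Notes on version B (the rewrite author's own statement) =====
-- stated objective: simpler
-- what changed: Replaces the counter-driven single pass with a row accumulator, modulo-9 flush and buffer reset by direct chunking: the grid is built as nine 9-char slices, each converted char-by-char with int().
import Mathlib
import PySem

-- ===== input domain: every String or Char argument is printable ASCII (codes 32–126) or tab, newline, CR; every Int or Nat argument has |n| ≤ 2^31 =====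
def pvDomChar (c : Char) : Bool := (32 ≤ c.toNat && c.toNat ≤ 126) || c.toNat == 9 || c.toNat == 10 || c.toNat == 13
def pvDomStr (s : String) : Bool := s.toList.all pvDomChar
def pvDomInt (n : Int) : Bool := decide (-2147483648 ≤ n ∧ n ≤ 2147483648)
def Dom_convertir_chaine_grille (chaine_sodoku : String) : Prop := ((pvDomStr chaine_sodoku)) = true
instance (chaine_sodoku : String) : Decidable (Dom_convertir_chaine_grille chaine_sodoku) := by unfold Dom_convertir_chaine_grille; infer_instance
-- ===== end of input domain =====

-- B replaces A's counter-driven pass (row buffer, modulo-9 flush, reset) by chunking the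
-- string into nine 9-character slices; objective: simpler. Same asymptotic cost.

-- int(c) for a single character, as both Pythons apply it (total here; Pre_ guarantees digits)
def pvIntChar (c : Char) : Int := (PySem.Int.ofStr? (String.singleton c)).getD 0

-- ===== PORT A =====
-- A's loop body: append int(element) to ligne, flush when (indice+1) % 9 == 0
def pvStepA (st : List (List Int) × List Int) (ic : Int × Char) : List (List Int) × List Int :=
  let ligne := st.2 ++ [pvIntChar ic.2]
  if PySem.Int.mod (ic.1 + 1) 9 = 0 then (st.1 ++ [ligne], []) else (st.1, ligne)

def convertir_chaine_grille (chaine_sodoku : String) : Bool × Option (List (List Int)) :=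
  if PySem.Str.len chaine_sodoku ≠ 81 then (false, none)
  else
    let r := (PySem.List.enumerate chaine_sodoku.toList 0).foldl pvStepA ([], [])
    (true, some r.1)

-- ===== PORT B =====
def convertir_chaine_grille_alt (chaine_sodoku : String) : Bool × Option (List (List Int)) :=
  if PySem.Str.len chaine_sodoku ≠ 81 then (false, none)
  else
    (true, some ((PySem.List.pyRange 0 81 9).map (fun i =>
      (PySem.List.slice chaine_sodoku.toList (some i) (some (i + 9))).map pvIntChar)))

-- ===== PRECONDITION & SPEC =====
-- Pre_ excludes exactly the inputs where Python's int(element) raises ValueError: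
-- a string of length 81 containing a non-digit character.
def Pre_convertir_chaine_grille (chaine_sodoku : String) : Prop :=
  chaine_sodoku.toList.length = 81 → chaine_sodoku.toList.all Char.isDigit = true
instance (chaine_sodoku : String) : Decidable (Pre_convertir_chaine_grille chaine_sodoku) := by unfold Pre_convertir_chaine_grille; infer_instance

def pvWitness_convertir_chaine_grille : String :=
  "123456789456789123789123456214365897365897214897214365531642978642978531978531642"

def Spec_convertir_chaine_grille (chaine_sodoku : String) (out : Bool × Option (List (List Int))) : Prop := out = convertir_chaine_grille_alt chaine_sodoku
instance (chaine_sodoku : String) (out : Bool × Option (List (List Int))) : Decidable (Spec_convertir_chaine_grille chaine_sodoku out) := by unfold Spec_convertir_chaine_grille; infer_instance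

-- ===== CLAIM (what is proved, stated in full; the proofs are below) =====
def Claim_equal_convertir_chaine_grille : Prop := ∀ (chaine_sodoku : String), Dom_convertir_chaine_grille chaine_sodoku → Pre_convertir_chaine_grille chaine_sodoku → Spec_convertir_chaine_grille chaine_sodoku (convertir_chaine_grille chaine_sodoku)

-- ===== LEMMAS AND PROOFS =====

-- Any list of length 81 is the pointwise map over range 81 of its getD values.
lemma pv_rep (l : List Char) (hl : l.length = 81) :
    l = (List.range 81).map (fun i => l.getD i ' ') := by
  apply List.ext_getElem
  · simp [hl]
  · intro i h1 h2
    simp [List.getElem?_eq_getElem h1]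

lemma pv_key (l : List Char) (hl : l.length = 81) :
    ((PySem.List.enumerate l 0).foldl pvStepA ([], [])).1 =
      (PySem.List.pyRange 0 81 9).map (fun i =>
        (PySem.List.slice l (some i) (some (i + 9))).map pvIntChar) := by
  rw [pv_rep l hl]
  simp [List.range_succ, PySem.List.enumerate, pvStepA, PySem.Int.mod,
    PySem.List.pyRange, PySem.List.slice, PySem.List.clampIdx]

-- ===== VERDICT (by name: the statement is the Claim_ definition above) =====
theorem convertir_chaine_grille_spec : Claim_equal_convertir_chaine_grille := by
  intro s _ _
  unfold Spec_convertir_chaine_grille convertir_chaine_grille convertir_chaine_grille_alt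
  by_cases h : s.toList.length = 81
  · have h' : ¬ (PySem.Str.len s ≠ 81) := by
      simp only [PySem.Str.len_eq]; omega
    rw [if_neg h', if_neg h']
    exact congrArg (fun g => (true, some g)) (pv_key s.toList h)
  · have h' : PySem.Str.len s ≠ 81 := by
      simp only [PySem.Str.len_eq]; omega
    rw [if_pos h', if_pos h']
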